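-- pv_equiv track=rewrite | github.com/peacock-lab/cognition-engine | cognition_engine/control_plane/builder.py | _mapping_status
-- ===== SOURCE A (Python) =====
-- from typing import Any, Dict, Iterable, Optional
--
-- def _mapping_status(artifacts: list[Dict[str, Any]]) -> str:
--     statuses = sorted(
--         {
--             status
--             for status in (artifact.get("mapping_status") for artifact in artifacts)
--             if status
--         }
--     )
--     if not statuses:
--         return "unmapped"
--     if len(statuses) == 1:
--         return statuses[0]
--     return "mixed_artifact_mapping"
-- ===== SOURCE B (Python) =====
-- from typing import Any, Dict
--
-- def _mapping_status(artifacts: list[Dict[str, Any]]) -> str: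
--     seen = None
--     for artifact in artifacts:
--         status = artifact.get("mapping_status")
--         if status:
--             if seen is None:
--                 seen = status
--             elif status != seen:
--                 return "mixed_artifact_mapping"
--     return "unmapped" if seen is None else seen
-- ===== Notes on version B (the rewrite author's own statement) =====
-- stated objective: simpler
-- what changed: Replaced the set comprehension plus sort plus length dispatch with a single short-circuiting scan that tracks one variable (the first truthy status) and returns 'mixed_artifact_mapping' as soon as a different one appears.
import Mathlib
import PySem

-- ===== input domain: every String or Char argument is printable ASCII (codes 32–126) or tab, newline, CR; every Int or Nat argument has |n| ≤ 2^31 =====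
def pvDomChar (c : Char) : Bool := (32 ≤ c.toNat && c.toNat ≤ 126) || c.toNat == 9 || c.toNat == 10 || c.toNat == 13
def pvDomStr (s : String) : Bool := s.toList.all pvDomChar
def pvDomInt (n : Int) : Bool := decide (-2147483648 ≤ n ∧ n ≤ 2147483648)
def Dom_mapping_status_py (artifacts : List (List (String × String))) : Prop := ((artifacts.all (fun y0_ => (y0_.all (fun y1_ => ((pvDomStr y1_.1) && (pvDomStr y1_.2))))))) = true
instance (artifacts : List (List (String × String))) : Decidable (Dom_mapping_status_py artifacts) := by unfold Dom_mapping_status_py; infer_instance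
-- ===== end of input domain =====

-- B replaces A's set+sort+length dispatch with a single short-circuiting scan tracking one Option variable; equivalent on all inputs.
-- ===== PORT A =====
def mapping_status_py (artifacts : List (List (String × String))) : String :=
  let gens := artifacts.map (fun artifact => artifact.lookup "mapping_status")
  let truthy := gens.filterMap (fun o => match o with
    | some s => if s ≠ "" then some s else none
    | none => none)
  let statuses := PySem.List.sorted (PySem.Set.ofList truthy) (fun x => x) false
  if statuses = [] then "unmapped"
  else if statuses.length = 1 then PySem.List.pyGetD statuses 0 ""
  else "mixed_artifact_mapping"

-- ===== PORT B =====
-- loop over the artifacts carrying `seen`, early exit on a second distinct truthy status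
def mappingStatusLoop (seen : Option String) : List (List (String × String)) → String
  | [] => match seen with
    | none => "unmapped"
    | some s => s
  | artifact :: rest =>
    match artifact.lookup "mapping_status" with
    | some status =>
      if status ≠ "" then
        match seen with
        | none => mappingStatusLoop (some status) rest
        | some t => if status ≠ t then "mixed_artifact_mapping" else mappingStatusLoop (some t) rest
      else mappingStatusLoop seen rest
    | none => mappingStatusLoop seen rest

def mapping_status_py_alt (artifacts : List (List (String × String))) : String :=
  mappingStatusLoop none artifacts

-- ===== PRECONDITION & SPEC =====
def Spec_mapping_status_py (artifacts : List (List (String × String))) (out : String) : Prop := out = mapping_status_py_alt artifacts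
instance (artifacts : List (List (String × String))) (out : String) : Decidable (Spec_mapping_status_py artifacts out) := by unfold Spec_mapping_status_py; infer_instance

-- ===== CLAIM (what is proved, stated in full; the proofs are below) =====
def Claim_equal_mapping_status_py : Prop := ∀ (artifacts : List (List (String × String))), Dom_mapping_status_py artifacts → Spec_mapping_status_py artifacts (mapping_status_py artifacts)

-- ===== LEMMAS AND PROOFS =====

-- ===== VERDICT (by name: the statement is the Claim_ definition above) =====
-- truthy statuses of the artifact list, shared characterisation
def statusOf (artifact : List (String × String)) : Option String :=
  match artifact.lookup "mapping_status" with
  | some s => if s ≠ "" then some s else none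
  | none => none

theorem loop_some (s : String) (l : List (List (String × String))) :
    mappingStatusLoop (some s) l =
      if ∀ t ∈ l.filterMap statusOf, t = s then s else "mixed_artifact_mapping" := by
  induction l with
  | nil => simp [mappingStatusLoop]
  | cons a rest ih =>
    cases h : a.lookup "mapping_status" with
    | none =>
      have hs : statusOf a = none := by simp [statusOf, h]
      simp only [mappingStatusLoop, h, List.filterMap_cons, hs]
      exact ih
    | some v =>
      by_cases hv : v = ""
      · have hs : statusOf a = none := by simp [statusOf, h, hv]
        simp only [mappingStatusLoop, h, hv, List.filterMap_cons, hs]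
        simpa using ih
      · have hs : statusOf a = some v := by simp [statusOf, h, hv]
        by_cases hvs : v = s
        · subst hvs
          simp only [mappingStatusLoop, h, List.filterMap_cons, hs]
          have hiff : (∀ t ∈ v :: List.filterMap statusOf rest, t = v) ↔
              (∀ t ∈ List.filterMap statusOf rest, t = v) := by
            simp
          simp [hv, ih]
          by_cases hall : ∀ t ∈ List.filterMap statusOf rest, t = v
          · rw [if_pos hall, if_pos (hiff.mpr hall)]
          · rw [if_neg hall, if_neg (fun hc => hall (hiff.mp hc))]
        · simp only [mappingStatusLoop, h, List.filterMap_cons, hs]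
          simp [hv, hvs]

theorem loop_none (l : List (List (String × String))) :
    mappingStatusLoop none l =
      match l.filterMap statusOf with
      | [] => "unmapped"
      | s :: rest => if ∀ t ∈ rest, t = s then s else "mixed_artifact_mapping" := by
  induction l with
  | nil => rfl
  | cons a rest ih =>
    cases h : a.lookup "mapping_status" with
    | none =>
      have hs : statusOf a = none := by simp [statusOf, h]
      simp only [mappingStatusLoop, h, List.filterMap_cons, hs]
      exact ih
    | some v =>
      by_cases hv : v = ""
      · have hs : statusOf a = none := by simp [statusOf, h, hv]
        simp only [mappingStatusLoop, h, hv, List.filterMap_cons, hs]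
        simpa using ih
      · have hs : statusOf a = some v := by simp [statusOf, h, hv]
        simp only [mappingStatusLoop, h, List.filterMap_cons, hs]
        simp [hv, loop_some v rest]

theorem foldl_add_subset (l acc : List String) (hm : ∀ t ∈ l, t ∈ acc) :
    l.foldl PySem.Set.add acc = acc := by
  induction l generalizing acc with
  | nil => rfl
  | cons x xs ih =>
    have hx : x ∈ acc := hm x (by simp)
    have hadd : PySem.Set.add acc x = acc := by
      simp [PySem.Set.add, hx]
    rw [List.foldl_cons, hadd]
    exact ih acc (fun t ht => hm t (by simp [ht]))

theorem ofList_all_eq (s : String) (l : List String) (h : ∀ t ∈ l, t = s) :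
    PySem.Set.ofList (s :: l) = [s] := by
  rw [PySem.Set.ofList_eq_foldl, List.foldl_cons]
  have h1 : PySem.Set.add [] s = [s] := rfl
  rw [h1]
  exact foldl_add_subset l [s] (fun t ht => by simp [h t ht])

theorem mapping_status_py_spec : Claim_equal_mapping_status_py := by
  intro artifacts _
  unfold Spec_mapping_status_py mapping_status_py mapping_status_py_alt
  rw [loop_none]
  dsimp only
  have htr : (artifacts.map (fun artifact => artifact.lookup "mapping_status")).filterMap
      (fun o => match o with
        | some s => if s ≠ "" then some s else none
        | none => none)
      = artifacts.filterMap statusOf := by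
    rw [List.filterMap_map]; rfl
  rw [htr]
  cases hcase : artifacts.filterMap statusOf with
  | nil => rfl
  | cons s rest =>
    dsimp only
    by_cases hall : ∀ t ∈ rest, t = s
    · rw [ofList_all_eq s rest hall]
      have hsor : PySem.List.sorted [s] (fun x : String => x) false = [s] := rfl
      rw [hsor, if_neg (by simp), if_pos (by simp), if_pos hall]
      rfl
    · rw [not_forall] at hall
      obtain ⟨t, hall⟩ := hall
      rw [Classical.not_imp] at hall
      obtain ⟨ht, hts⟩ := hall
      have hs' : s ∈ PySem.List.sorted (PySem.Set.ofList (s :: rest)) (fun x => x) false := by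
        rw [PySem.List.mem_sorted]
        exact (PySem.Set.mem_ofList _ _).mpr (by simp)
      have ht' : t ∈ PySem.List.sorted (PySem.Set.ofList (s :: rest)) (fun x => x) false := by
        rw [PySem.List.mem_sorted]
        exact (PySem.Set.mem_ofList _ _).mpr (by simp [ht])
      rw [if_neg (List.ne_nil_of_mem hs')]
      rw [if_neg (fun hlen => by
        obtain ⟨u, hu⟩ := List.length_eq_one_iff.mp hlen
        rw [hu] at hs' ht'
        simp at hs' ht'
        exact hts (ht'.trans hs'.symm))]
      rw [if_neg (fun hc => hts (hc t ht))]
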